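-- pv_equiv track=rewrite | github.com/timdeng2/FantasyBballOptimizer | fantasy.py | calculate_max
-- ===== SOURCE A (Python) =====
-- import copy
--
-- def calculate_max(big_list : list, keep_list : list): #given list of n lists and our keep_max_list
--     x = combinations_without_repeats(big_list)
--     length = len(keep_list)
--     zero = [0 for i in range(length)]
--     curr_max = 0
--     track = []
--
--     for tup_comb in x:
--         zero_internal = copy.deepcopy(zero)
--         for tup in tup_comb:
--             zero_internal = [x + y for x, y in zip(zero_internal, tup[1])]
--         total = [ i + j for i, j in zip(zero_internal, keep_list)]
--         for p in range(length):
--             if total[p] > 10: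
--                 total[p] = 10
--         this = sum(total)
--         if this > curr_max:
--             curr_max = this
--             track.clear()
--             track.append(tup_comb)
--         elif this == curr_max:
--             track.append(tup_comb)
--
--     return (curr_max, track)
--
-- def combinations_without_repeats(lists):
--     if not lists:
--         return [[]]
--     first, *rest = lists
--     combinations_rest = combinations_without_repeats(rest)
--     result = []
--     for elem in first:
--         for combination in combinations_rest:
--             if elem not in combination:
--                 result.append([elem, *combination])
--     return result
-- ===== SOURCE B (Python) =====
-- def calculate_max(big_list, keep_list):
--     # Build all selections (one element per inner list, no repeated elements)
--     # front-to-back, pruning repeats as we extend; same order as the product.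
--     combos = [[]]
--     for options in big_list:
--         combos = [c + [e] for c in combos for e in options if e not in c]
--     # Score each selection: per-category column sum plus keep_list, capped at 10.
--     def score(c):
--         vecs = [t[1] for t in c]
--         return sum(min(10, k + sum(v[p] if p < len(v) else 0 for v in vecs))
--                    for p, k in enumerate(keep_list))
--     scores = [score(c) for c in combos]
--     best = max(scores + [0])
--     return (best, [c for c, s in zip(combos, scores) if s == best])
-- ===== Notes on version B (the rewrite author's own statement) =====
-- stated objective: idiomatic
-- what changed: Replaces the recursive back-to-front generation of repeat-free selections by an iterative front-to-back cross-product build that prunes repeats as it extends, and replaces the running-max/track mutation loop by scoring every selection once and then taking max plus a filter for the ties.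
import Mathlib
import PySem

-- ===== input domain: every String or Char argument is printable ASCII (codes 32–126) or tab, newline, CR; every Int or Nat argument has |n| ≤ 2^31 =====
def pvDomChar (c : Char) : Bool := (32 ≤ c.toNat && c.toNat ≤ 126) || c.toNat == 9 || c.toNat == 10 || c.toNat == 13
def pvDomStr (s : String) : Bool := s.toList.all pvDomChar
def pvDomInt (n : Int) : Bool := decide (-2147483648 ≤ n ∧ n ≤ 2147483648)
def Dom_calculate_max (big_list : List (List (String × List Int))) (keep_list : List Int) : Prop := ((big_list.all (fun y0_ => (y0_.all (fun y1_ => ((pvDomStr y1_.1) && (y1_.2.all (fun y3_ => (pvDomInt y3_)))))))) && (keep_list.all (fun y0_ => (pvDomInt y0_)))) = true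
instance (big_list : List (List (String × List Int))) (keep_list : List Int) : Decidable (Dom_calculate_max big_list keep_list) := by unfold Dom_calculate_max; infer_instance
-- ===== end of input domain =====

-- B replaces the recursive back-to-front generation of repeat-free selections by an iterative
-- front-to-back product build with early pruning, and the running-max/track loop by
-- score-everything + max + filter for ties (idiomatic decomposition, same cost).


-- ===== PORT A =====
def combinations_without_repeats (lists : List (List (String × List Int))) : List (List (String × List Int)) :=
  match lists with
  | [] => [[]]
  | first :: rest =>
    let combinations_rest := combinations_without_repeats rest
    first.foldl (fun result elem =>
      combinations_rest.foldl (fun result combination =>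
        if !combination.contains elem then result ++ [elem :: combination] else result)
        result) []

def calculate_max (big_list : List (List (String × List Int))) (keep_list : List Int) : Int × (List (List (String × List Int))) :=
  let x := combinations_without_repeats big_list
  let length := keep_list.length
  let zero : List Int := List.replicate length 0          -- [0 for i in range(length)]
  x.foldl (fun st tup_comb =>
    let zero_internal := tup_comb.foldl (fun zi tup => List.zipWith (fun x y => x + y) zi tup.2) zero
    let total := List.zipWith (fun i j => i + j) zero_internal keep_list
    -- the read total[p] raises IndexError in Python when p is out of range; Pre_ excludes
    -- exactly those inputs, so the total pyGetD/pySetD forms are exact on Pre_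
    let total := (PySem.List.pyRange 0 (length : Int) 1).foldl (fun total p =>
        if PySem.List.pyGetD total p 0 > 10 then PySem.List.pySetD total p 10 else total) total
    let this := total.sum
    if this > st.1 then (this, [tup_comb])
    else if this = st.1 then (st.1, st.2 ++ [tup_comb])
    else st)
    ((0 : Int), ([] : List (List (String × List Int))))

-- ===== PORT B =====
def calculate_max_alt (big_list : List (List (String × List Int))) (keep_list : List Int) : Int × (List (List (String × List Int))) :=
  let combos := big_list.foldl (fun combos options =>
      combos.flatMap (fun c => (options.filter (fun e => !c.contains e)).map (fun e => c ++ [e])))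
      [([] : List (String × List Int))]
  let score : List (String × List Int) → Int := fun c =>
    let vecs := c.map (fun t => t.2)
    -- Source B's bounds-checked read 'v[p] if p < len(v) else 0' for the nonnegative index p
    ((PySem.List.enumerate keep_list 0).map (fun pk =>
        min 10 (pk.2 + (vecs.map (fun v => PySem.List.pyGetD v pk.1 0)).sum))).sum
  let scores := combos.map score
  let best := (PySem.List.max? (scores ++ [0]) (fun s => s)).getD 0   -- list is nonempty: max(scores + [0])
  (best, ((combos.zip scores).filter (fun cs => cs.2 = best)).map (fun cs => cs.1))

-- ===== PRECONDITION & SPEC =====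
-- input property used by Pre_: does a repeat-free selection (one element per inner list,
-- all chosen elements pairwise distinct, avoiding `avoid`) exist? It decides an input shape
-- and computes neither program's output.
def pvHasSel : List (List (String × List Int)) → List (String × List Int) → Bool
  | [], _ => true
  | l :: ls, avoid => l.any (fun e => !avoid.contains e && pvHasSel ls (e :: avoid))

-- Pre_ excludes EXACTLY the inputs on which A raises IndexError: some stat vector is shorter
-- than keep_list AND a repeat-free selection exists (then some selection contains a short
-- vector and A's total[p] read goes out of range); everywhere A returns, Pre_ holds.
def Pre_calculate_max (big_list : List (List (String × List Int))) (keep_list : List Int) : Prop :=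
  (∀ l ∈ big_list, ∀ t ∈ l, keep_list.length ≤ t.2.length) ∨ pvHasSel big_list [] = false
instance (big_list : List (List (String × List Int))) (keep_list : List Int) : Decidable (Pre_calculate_max big_list keep_list) := by unfold Pre_calculate_max; infer_instance

def pvWitness_calculate_max : (List (List (String × List Int))) × List Int :=
  ([[("a", [5, 9]), ("b", [2, 0])], [("b", [2, 0]), ("c", [1, 1])]], [3, 4])

def Spec_calculate_max (big_list : List (List (String × List Int))) (keep_list : List Int) (out : Int × (List (List (String × List Int)))) : Prop := out = calculate_max_alt big_list keep_list
instance (big_list : List (List (String × List Int))) (keep_list : List Int) (out : Int × (List (List (String × List Int)))) : Decidable (Spec_calculate_max big_list keep_list out) := by unfold Spec_calculate_max; infer_instance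

-- ===== CLAIM (what is proved, stated in full; the proofs are below) =====
def Claim_equal_calculate_max : Prop := ∀ (big_list : List (List (String × List Int))) (keep_list : List Int), Dom_calculate_max big_list keep_list → Pre_calculate_max big_list keep_list → Spec_calculate_max big_list keep_list (calculate_max big_list keep_list)

-- ===== LEMMAS AND PROOFS =====

-- pairwise-distinct test (Bool), full cross product, and the "extends c without repeats" test
def pvPD : List (String × List Int) → Bool
  | [] => true
  | e :: t => !t.contains e && pvPD t

def pvAllP : List (List (String × List Int)) → List (List (String × List Int))
  | [] => [[]]
  | first :: rest => first.flatMap (fun e => (pvAllP rest).map (fun t => e :: t))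

def pvOk (c t : List (String × List Int)) : Bool :=
  t.all (fun e => !c.contains e) && pvPD t

theorem pvOk_nil_left (t : List (String × List Int)) : pvOk [] t = pvPD t := by
  simp [pvOk]

theorem pvOk_cons (c : List (String × List Int)) (e : String × List Int)
    (t : List (String × List Int)) :
    pvOk c (e :: t) = (!c.contains e && pvOk (c ++ [e]) t) := by
  apply Bool.eq_iff_iff.mpr
  simp only [pvOk, pvPD, Bool.and_eq_true, Bool.not_eq_true', List.all_eq_true,
    List.contains_eq_mem, decide_eq_false_iff_not, List.mem_append, List.mem_singleton,
    List.forall_mem_cons, not_or]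
  constructor
  · rintro ⟨⟨h1, h2⟩, h3, h4⟩
    exact ⟨h1, fun x hx => ⟨h2 x hx, fun he => h3 (he ▸ hx)⟩, h4⟩
  · rintro ⟨h1, h2, h3⟩
    refine ⟨⟨h1, fun x hx => (h2 x hx).1⟩, fun he => (h2 e he).2 rfl, h3⟩

-- pvOk only looks at membership in its first argument
theorem pvOk_swap (c : List (String × List Int)) (e : String × List Int)
    (t : List (String × List Int)) : pvOk (c ++ [e]) t = pvOk (e :: c) t := by
  apply Bool.eq_iff_iff.mpr
  simp only [pvOk, Bool.and_eq_true, List.all_eq_true, Bool.not_eq_true',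
    List.contains_eq_mem, decide_eq_false_iff_not, List.mem_append,
    List.mem_cons, not_or]
  constructor <;> rintro ⟨h1, h2⟩ <;>
    exact ⟨fun x hx => by have := h1 x hx; tauto, h2⟩

-- the selection-existence test of Pre_ matches the generator's emptiness
theorem pv_hasSel_iff (ls : List (List (String × List Int))) :
    ∀ avoid, pvHasSel ls avoid = true ↔ ∃ t ∈ pvAllP ls, pvOk avoid t = true := by
  induction ls with
  | nil =>
    intro avoid
    simp [pvHasSel, pvAllP, pvOk, pvPD]
  | cons l ls ih =>
    intro avoid
    simp only [pvHasSel, List.any_eq_true, Bool.and_eq_true, pvAllP, List.mem_flatMap,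
      List.mem_map]
    constructor
    · rintro ⟨e, he, hne, hsel⟩
      obtain ⟨t, ht, hok⟩ := (ih (e :: avoid)).mp hsel
      refine ⟨e :: t, ⟨e, he, t, ht, rfl⟩, ?_⟩
      rw [pvOk_cons, hne, pvOk_swap, hok]
      rfl
    · rintro ⟨t', ⟨e, he, t, ht, rfl⟩, hok⟩
      rw [pvOk_cons, pvOk_swap] at hok
      rcases Bool.and_eq_true .. |>.mp hok with ⟨hne, hok'⟩
      exact ⟨e, he, hne, (ih (e :: avoid)).mpr ⟨t, ht, hok'⟩⟩

-- A's recursive generator produces exactly the pairwise-distinct product tuples, in order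
theorem pv_cwr_eq (lists : List (List (String × List Int))) :
    combinations_without_repeats lists = (pvAllP lists).filter pvPD := by
  induction lists with
  | nil => rfl
  | cons first rest ih =>
    show (first.foldl (fun result elem =>
      (combinations_without_repeats rest).foldl (fun result combination =>
        if !combination.contains elem then result ++ [elem :: combination] else result)
        result) []) = _
    simp only [PySem.List.foldl_append_if, PySem.List.foldl_append_eq_flatMap, ih]
    show List.flatMap (fun elem => (((pvAllP rest).filter pvPD).filter
        (fun combination => !combination.contains elem)).map (fun combination => elem :: combination)) first = _
    show _ = ((pvAllP (first :: rest)).filter pvPD)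
    rw [pvAllP, List.filter_flatMap]
    apply congrArg (fun f => List.flatMap f first) ; funext e
    rw [List.filter_map, List.filter_filter]
    apply congrArg (List.map _)
    apply List.filter_congr
    intro t _
    simp [pvPD, Function.comp]

theorem pv_flatMap_filter {α β : Type} (p : α → Bool) (g : α → List β) (l : List α) :
    (l.filter p).flatMap g = l.flatMap (fun e => if p e then g e else []) := by
  induction l with
  | nil => rfl
  | cons a l ih =>
    by_cases h : p a = true <;> simp [h, ih]

-- B's iterative build, characterised against the full product
theorem pv_build_eq (lists : List (List (String × List Int))) :
    ∀ acc : List (List (String × List Int)),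
    lists.foldl (fun combos options =>
        combos.flatMap (fun c => (options.filter (fun e => !c.contains e)).map (fun e => c ++ [e]))) acc
      = acc.flatMap (fun c => ((pvAllP lists).filter (pvOk c)).map (fun t => c ++ t)) := by
  induction lists with
  | nil =>
    intro acc
    simp [pvAllP, pvOk, pvPD]
  | cons first rest ih =>
    intro acc
    rw [List.foldl_cons, ih]
    rw [List.flatMap_assoc]
    apply congrArg (fun f => List.flatMap f acc) ; funext c
    rw [List.flatMap_map]
    rw [pvAllP, List.filter_flatMap, List.map_flatMap]
    rw [pv_flatMap_filter]
    apply congrArg (fun f => List.flatMap f first) ; funext e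
    rw [List.filter_map, List.map_map]
    by_cases hc : c.contains e = true
    · have hm : e ∈ c := by simpa [List.contains_eq_mem] using hc
      have hpred : (pvOk c ∘ fun t => e :: t) = fun _ => false := by
        funext t; simp [Function.comp, pvOk_cons, hm]
      simp [hpred]
      exact fun h => absurd hm h
    · have hm : e ∉ c := by simpa [List.contains_eq_mem] using hc
      have hc' : c.contains e = false := by simpa [List.contains_eq_mem] using hc
      have hpred : (pvOk c ∘ fun t => e :: t) = pvOk (c ++ [e]) := by
        funext t; simp [Function.comp, pvOk_cons, hm]
      simp only [hc', Bool.not_false, if_pos, hpred]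
      exact List.map_inj_left.mpr fun t _ => by simp

-- membership in the product: every chosen element comes from its list
theorem pv_mem_allP {lists : List (List (String × List Int))} {c : List (String × List Int)}
    (h : c ∈ pvAllP lists) : ∀ x ∈ c, ∃ l ∈ lists, x ∈ l := by
  induction lists generalizing c with
  | nil =>
    simp [pvAllP] at h
    subst h; intro x hx; cases hx
  | cons first rest ih =>
    simp only [pvAllP, List.mem_flatMap, List.mem_map] at h
    obtain ⟨e, he, t, ht, rfl⟩ := h
    intro x hx
    rcases List.mem_cons.mp hx with rfl | hx'
    · exact ⟨first, List.mem_cons_self, he⟩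
    · obtain ⟨l, hl, hxl⟩ := ih ht x hx'
      exact ⟨l, List.mem_cons_of_mem _ hl, hxl⟩

-- the common reference score: per category, column sum + keep, capped at 10, summed
def pvScore (kl : List Int) (c : List (String × List Int)) : Int :=
  ((List.range kl.length).map
    (fun p => min 10 (kl.getD p 0 + (c.map (fun t => t.2.getD p 0)).sum))).sum

theorem pv_range_map_getD (l : List Int) :
    (List.range l.length).map (fun p => l.getD p 0) = l := by
  induction l with
  | nil => rfl
  | cons a l ih =>
    rw [List.length_cons, List.range_succ_eq_map, List.map_cons, List.map_map]
    simpa using ih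

-- the zipWith-accumulation computes pointwise column sums
theorem pv_fold_zip (vs : List (List Int)) : ∀ z : List Int, (∀ v ∈ vs, z.length ≤ v.length) →
    vs.foldl (fun zi v => List.zipWith (fun x y => x + y) zi v) z
      = (List.range z.length).map (fun p => z.getD p 0 + (vs.map (fun v => v.getD p 0)).sum) := by
  induction vs with
  | nil => intro z _; simpa using (pv_range_map_getD z).symm
  | cons v rest ih =>
    intro z h
    have hvz : z.length ≤ v.length := h v List.mem_cons_self
    have hzl : (List.zipWith (fun x y : Int => x + y) z v).length = z.length := by
      rw [List.length_zipWith]; omega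
    rw [List.foldl_cons, ih _ (by intro v' hv'; rw [hzl]; exact h v' (List.mem_cons_of_mem _ hv')), hzl]
    apply List.map_congr_left
    intro p hp
    rw [List.mem_range] at hp
    have hz : (List.zipWith (fun x y : Int => x + y) z v).getD p 0 = z.getD p 0 + v.getD p 0 := by
      rw [List.getD_eq_getElem _ _ (by omega), List.getElem_zipWith,
        List.getD_eq_getElem _ _ hp, List.getD_eq_getElem _ _ (by omega)]
    rw [hz, List.map_cons, List.sum_cons]
    ring

-- the in-place capping loop is a map
theorem pv_cap_fold : ∀ (post pre : List Int),
    (PySem.List.pyRange (pre.length : Int) ((pre.length + post.length : Nat) : Int) 1).foldl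
      (fun total p => if PySem.List.pyGetD total p 0 > 10 then PySem.List.pySetD total p 10 else total)
      (pre ++ post)
    = pre ++ post.map (fun v => if v > 10 then 10 else v) := by
  intro post
  induction post with
  | nil => intro pre; simp
  | cons v rest ih =>
    intro pre
    rw [PySem.List.pyRange_one_cons (by simp only [List.length_cons]; push_cast; omega), List.foldl_cons]
    have hget : PySem.List.pyGetD (pre ++ v :: rest) ((pre.length : Nat) : Int) 0 = v := by
      rw [PySem.List.pyGetD_natCast, List.getD_append_right _ _ _ _ (le_refl _)]
      simp
    have hstep : (if PySem.List.pyGetD (pre ++ v :: rest) ((pre.length : Nat) : Int) 0 > 10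
        then PySem.List.pySetD (pre ++ v :: rest) ((pre.length : Nat) : Int) 10
        else pre ++ v :: rest)
        = pre ++ (if v > 10 then 10 else v) :: rest := by
      rw [hget]
      by_cases hv : v > 10
      · rw [if_pos hv, if_pos hv, PySem.List.pySetD_natCast,
          List.set_append_right _ _ (le_refl _)]
        simp
      · rw [if_neg hv, if_neg hv]
    rw [hstep]
    have h2 := ih (pre ++ [if v > 10 then 10 else v])
    simp only [List.length_append, List.length_cons, List.length_nil, List.append_assoc,
      List.cons_append, List.nil_append] at h2 ⊢
    have harg : ((pre.length + 1 + rest.length : Nat) : Int) = ((pre.length + (rest.length + 1) : Nat) : Int) := by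
      push_cast; ring
    have harg2 : ((pre.length + 1 : Nat) : Int) = (pre.length : Int) + 1 := by push_cast; ring
    rw [harg, harg2] at h2
    exact h2

theorem pv_cap_fold0 (l : List Int) (n : Nat) (hn : l.length = n) :
    (PySem.List.pyRange 0 (n : Int) 1).foldl
      (fun total p => if PySem.List.pyGetD total p 0 > 10 then PySem.List.pySetD total p 10 else total) l
    = l.map (fun v => if v > 10 then 10 else v) := by
  have := pv_cap_fold l []
  simpa [hn] using this

-- A's per-combination computation equals the reference score
theorem pv_scoreA (kl : List Int) (c : List (String × List Int))
    (h : ∀ t ∈ c, kl.length ≤ t.2.length) :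
    ((PySem.List.pyRange 0 ((kl.length : Nat) : Int) 1).foldl
      (fun total p => if PySem.List.pyGetD total p 0 > 10 then PySem.List.pySetD total p 10 else total)
      (List.zipWith (fun i j => i + j)
        (c.foldl (fun zi tup => List.zipWith (fun x y => x + y) zi tup.2) (List.replicate kl.length 0))
        kl)).sum
    = pvScore kl c := by
  have hfold : c.foldl (fun zi tup => List.zipWith (fun x y => x + y) zi tup.2) (List.replicate kl.length 0)
      = (List.range kl.length).map (fun p => ((c.map (fun t => t.2)).map (fun v => v.getD p 0)).sum) := by
    have h1 : c.foldl (fun zi tup => List.zipWith (fun x y => x + y) zi tup.2) (List.replicate kl.length 0)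
        = (c.map (fun t => t.2)).foldl (fun zi v => List.zipWith (fun x y => x + y) zi v)
            (List.replicate kl.length 0) := by
      rw [List.foldl_map]
    rw [h1, pv_fold_zip _ _ ?hlen]
    case hlen =>
      intro v hv
      rw [List.length_replicate]
      obtain ⟨t, ht, rfl⟩ := List.mem_map.mp hv
      exact h t ht
    simp
  rw [hfold]
  have hzip : List.zipWith (fun i j : Int => i + j)
      ((List.range kl.length).map (fun p => ((c.map (fun t => t.2)).map (fun v => v.getD p 0)).sum)) kl
      = (List.range kl.length).map
        (fun p => ((c.map (fun t => t.2)).map (fun v => v.getD p 0)).sum + kl.getD p 0) := by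
    apply List.ext_getElem
    · simp
    · intro i h1 h2
      simp only [List.getElem_zipWith, List.getElem_map, List.getElem_range]
      rw [List.getD_eq_getElem _ _ (by simpa using h1)]
  rw [hzip, pv_cap_fold0 _ _ (by simp)]
  rw [List.map_map, pvScore]
  apply congrArg List.sum
  apply List.map_congr_left
  intro p _
  simp only [Function.comp, List.map_map]
  have : ∀ x y : Int, (if x + y > 10 then 10 else x + y) = min 10 (y + x) := by
    intro x y; rw [min_def]; split_ifs <;> omega
  rw [this]
  simp [Function.comp_def]

-- B's per-combination score equals the reference score (no length hypothesis needed)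
theorem pv_scoreB (kl : List Int) (c : List (String × List Int)) :
    ((PySem.List.enumerate kl 0).map (fun pk =>
        min 10 (pk.2 + ((c.map (fun t => t.2)).map (fun v => PySem.List.pyGetD v pk.1 0)).sum))).sum
    = pvScore kl c := by
  rw [PySem.List.enumerate_eq_map_pyRange kl 0, PySem.List.pyRange_zero, pvScore]
  apply congrArg List.sum
  simp only [List.map_map]
  apply List.map_congr_left
  intro p hp
  rw [List.mem_range] at hp
  simp [Function.comp_def, PySem.List.pyGetD_natCast]

-- the running-max / track loop, characterised
theorem pv_loop (kl : List Int) (cs : List (List (String × List Int))) :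
    ∀ (m : Int) (tr : List (List (String × List Int))),
    cs.foldl (fun st c =>
        if pvScore kl c > st.1 then (pvScore kl c, [c])
        else if pvScore kl c = st.1 then (st.1, st.2 ++ [c]) else st) (m, tr)
    = ((cs.map (pvScore kl)).foldl max m,
       (if (cs.map (pvScore kl)).foldl max m = m then tr else []) ++
         cs.filter (fun c => decide (pvScore kl c = (cs.map (pvScore kl)).foldl max m))) := by
  induction cs with
  | nil => intro m tr; simp
  | cons c rest ih =>
    intro m tr
    rw [List.foldl_cons, List.map_cons, List.foldl_cons, List.filter_cons]
    by_cases h1 : pvScore kl c > m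
    · rw [if_pos h1, ih]
      have hmax : max m (pvScore kl c) = pvScore kl c := by omega
      rw [hmax]
      have hMs := (PySem.List.le_foldl_max (rest.map (pvScore kl)) (pvScore kl c)).1
      rw [if_neg (by omega : ¬ (rest.map (pvScore kl)).foldl max (pvScore kl c) = m)]
      simp only [decide_eq_true_eq]
      split_ifs with hA hB hB
      · simp
      · exact absurd hA.symm hB
      · exact absurd hB.symm hA
      · simp
    · rw [if_neg h1]
      by_cases h2 : pvScore kl c = m
      · rw [if_pos h2, ih]
        have hmax : max m (pvScore kl c) = m := by omega
        rw [hmax]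
        by_cases h3 : (rest.map (pvScore kl)).foldl max m = m
        · have h4 : pvScore kl c = (rest.map (pvScore kl)).foldl max m := by rw [h2, h3]
          simp [h3, h4, List.append_assoc]
        · have h4 : ¬ pvScore kl c = (rest.map (pvScore kl)).foldl max m := by
            intro hh; exact h3 (by rw [← hh, h2])
          simp [h3, h4]
      · rw [if_neg h2, ih]
        have hmax : max m (pvScore kl c) = m := by omega
        rw [hmax]
        have hMm := (PySem.List.le_foldl_max (rest.map (pvScore kl)) m).1
        have h4 : ¬ pvScore kl c = (rest.map (pvScore kl)).foldl max m := by omega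
        simp [h4]

-- Python max(l + [0]) equals the running fold from 0
theorem pv_foldl_max_comm (t : List Int) : ∀ a b : Int, max (t.foldl max a) b = t.foldl max (max a b) := by
  induction t with
  | nil => intro a b; rfl
  | cons x t ih =>
    intro a b
    rw [List.foldl_cons, List.foldl_cons, ih]
    have : max (max a x) b = max (max a b) x := by omega
    rw [this]

theorem pv_max_append_zero (l : List Int) :
    (PySem.List.max? (l ++ [0]) (fun y => y)).getD 0 = l.foldl max 0 := by
  cases l with
  | nil => rfl
  | cons a t =>
    rw [List.cons_append, PySem.List.max?_id_cons, Option.getD_some, List.foldl_append]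
    simp only [List.foldl_cons, List.foldl_nil]
    rw [pv_foldl_max_comm]
    have : max a 0 = max 0 a := by omega
    rw [this]

-- zip-with-scores filter projects to a plain filter
theorem pv_zip_filter (l : List (List (String × List Int))) (f : List (String × List Int) → Int) (b : Int) :
    (((l.zip (l.map f)).filter (fun cs => decide (cs.2 = b))).map (fun cs => cs.1))
      = l.filter (fun c => decide (f c = b)) := by
  induction l with
  | nil => rfl
  | cons c l ih =>
    rw [List.map_cons, List.zip_cons_cons, List.filter_cons, List.filter_cons]
    by_cases h : f c = b <;> simp [h, ih]

-- ===== VERDICT (by name: the statements are the Claim_ definitions above) =====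
theorem calculate_max_spec : Claim_equal_calculate_max := by
  unfold Claim_equal_calculate_max
  intro bl kl _ hpre
  unfold Spec_calculate_max
  have hlen : ∀ c ∈ (pvAllP bl).filter pvPD, ∀ t ∈ c, kl.length ≤ t.2.length := by
    rcases hpre with hpre' | hsel
    · intro c hc t ht
      obtain ⟨l, hl, htl⟩ := pv_mem_allP (List.mem_filter.mp hc).1 t ht
      exact hpre' l hl t htl
    · have hnil : (pvAllP bl).filter pvPD = [] := by
        by_contra h
        obtain ⟨c, hc⟩ := List.exists_mem_of_ne_nil _ h
        have hok : pvOk [] c = true := by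
          rw [pvOk_nil_left]; exact (List.mem_filter.mp hc).2
        have := (pv_hasSel_iff bl []).mpr ⟨c, (List.mem_filter.mp hc).1, hok⟩
        rw [hsel] at this; cases this
      rw [hnil]; intro c hc; cases hc
  have hb : bl.foldl (fun combos options =>
      combos.flatMap (fun c => (options.filter (fun e => !c.contains e)).map (fun e => c ++ [e])))
      [([] : List (String × List Int))] = (pvAllP bl).filter pvPD := by
    rw [pv_build_eq]
    simp only [List.flatMap_cons, List.flatMap_nil, List.append_nil, List.nil_append]
    have : (pvOk []) = pvPD := funext pvOk_nil_left
    rw [this]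
    simp
  have hA : calculate_max bl kl
      = ((((pvAllP bl).filter pvPD).map (pvScore kl)).foldl max 0,
         ((pvAllP bl).filter pvPD).filter
           (fun c => decide (pvScore kl c = (((pvAllP bl).filter pvPD).map (pvScore kl)).foldl max 0))) := by
    unfold calculate_max
    rw [pv_cwr_eq]
    rw [PySem.List.foldl_congr_mem _ _
      (fun st c => if pvScore kl c > st.1 then (pvScore kl c, [c])
        else if pvScore kl c = st.1 then (st.1, st.2 ++ [c]) else st) _
      (by intro st c hc
          show (if _ > st.1 then _ else _) = _
          rw [pv_scoreA kl c (hlen c hc)])]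
    rw [pv_loop]
    simp
  have hB : calculate_max_alt bl kl
      = ((((pvAllP bl).filter pvPD).map (pvScore kl)).foldl max 0,
         ((pvAllP bl).filter pvPD).filter
           (fun c => decide (pvScore kl c = (((pvAllP bl).filter pvPD).map (pvScore kl)).foldl max 0))) := by
    unfold calculate_max_alt
    rw [hb]
    have hscore : (fun c : List (String × List Int) =>
        ((PySem.List.enumerate kl 0).map (fun pk =>
          min 10 (pk.2 + ((c.map (fun t => t.2)).map (fun v => PySem.List.pyGetD v pk.1 0)).sum))).sum)
        = pvScore kl := funext (fun c => pv_scoreB kl c)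
    rw [hscore]
    dsimp only
    rw [pv_max_append_zero, pv_zip_filter]
  rw [hA, hB]
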